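-- pv_equiv track=rewrite | github.com/tatikonda/codewars | make_valley.py | make_valley
-- ===== SOURCE A (Python) =====
-- def make_valley(arr):
--     lst = sorted(arr)
--     if len(lst)% 2 == 1:
--         center = [lst.pop(0)]
--     else:
--         center = []
--     left = []
--     right = []
--     for idx in range(0,len(lst)):
--         if idx % 2 == 0:
--             right.append(lst[idx])
--         else:
--             left.append(lst[idx])
--     left.sort(reverse=True)
--     return left + center + right
-- ===== SOURCE B (Python) =====
-- def make_valley(arr):
--     s = sorted(arr, reverse=True)
--     return s[::2] + s[1::2][::-1]
-- ===== Notes on version B (the rewrite author's own statement) =====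
-- stated objective: simpler
-- what changed: Replaces the sort/pop-center/parity-split loop/re-sort pipeline with a single descending sort and two extended slices: the even-indexed slice forms the left slope and the reversed odd-indexed slice forms the right slope.
import Mathlib
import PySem

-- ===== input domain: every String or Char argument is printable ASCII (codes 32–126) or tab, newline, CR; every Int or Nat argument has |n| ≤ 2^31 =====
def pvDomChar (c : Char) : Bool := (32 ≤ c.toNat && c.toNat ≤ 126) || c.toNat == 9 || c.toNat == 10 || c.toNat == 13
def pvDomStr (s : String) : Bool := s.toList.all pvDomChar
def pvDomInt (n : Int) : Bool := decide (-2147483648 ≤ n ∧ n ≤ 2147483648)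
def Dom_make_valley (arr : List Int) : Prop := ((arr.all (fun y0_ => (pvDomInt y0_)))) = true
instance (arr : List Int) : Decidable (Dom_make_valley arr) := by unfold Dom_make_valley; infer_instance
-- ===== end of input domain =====

-- B replaces A's sort / pop-the-center / parity-split loop / re-sort pipeline by one
-- descending sort plus two extended slices (objective: simpler; same O(n log n) cost).

-- ===== PORT A =====
def make_valley (arr : List Int) : List Int :=
  let lst := PySem.List.sorted arr (fun x => x)
  let cl : List Int × List Int :=
    if lst.length % 2 = 1 then
      match PySem.List.pop? lst 0 with
      | some (c, rest) => ([c], rest)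
      | none => ([], lst)   -- unreachable: odd length means lst ≠ [], so lst.pop(0) succeeds
    else ([], lst)
  let center := cl.1
  let lst := cl.2
  let lr : List Int × List Int :=
    (PySem.List.pyRange 0 (lst.length : Int)).foldl
      (fun (st : List Int × List Int) idx =>
        if PySem.Int.mod idx 2 = 0 then (st.1, st.2 ++ [PySem.List.pyGetD lst idx 0])
        else (st.1 ++ [PySem.List.pyGetD lst idx 0], st.2))
      ([], [])
  PySem.List.sorted lr.1 (fun x => x) true ++ center ++ lr.2

-- ===== PORT B =====
-- Source B:  s = sorted(arr, reverse=True); return s[::2] + s[1::2][::-1]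
def make_valley_alt (arr : List Int) : List Int :=
  let s := PySem.List.sorted arr (fun x => x) true
  ((PySem.List.slice? s none none 2).getD []) ++
    ((PySem.List.slice? ((PySem.List.slice? s (some 1) none 2).getD []) none none (-1)).getD [])

-- ===== PRECONDITION & SPEC =====
def Spec_make_valley (arr : List Int) (out : List Int) : Prop := out = make_valley_alt arr
instance (arr : List Int) (out : List Int) : Decidable (Spec_make_valley arr out) := by unfold Spec_make_valley; infer_instance

-- ===== CLAIM (what is proved, stated in full; the proofs are below) =====
def Claim_equal_make_valley : Prop := ∀ (arr : List Int), Dom_make_valley arr → Spec_make_valley arr (make_valley arr)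

-- ===== LEMMAS AND PROOFS =====

-- eo l = the even-indexed elements of l (Python l[::2]); oo l = the odd-indexed ones (l[1::2])
def eo : List Int → List Int
  | [] => []
  | [x] => [x]
  | x :: _ :: t => x :: eo t
def oo (l : List Int) : List Int := eo l.tail
lemma eo_length (l : List Int) : (eo l).length = (l.length + 1) / 2 := by
  induction l using eo.induct
  all_goals simp [eo, *]
  omega
lemma oo_length (l : List Int) : (oo l).length = l.length / 2 := by
  cases l with
  | nil => simp [oo, eo]
  | cons x t => simp [oo, eo_length]
lemma eo_getD (l : List Int) (k : Nat) : (eo l).getD k 0 = l.getD (2 * k) 0 := by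
  induction l using eo.induct generalizing k with
  | case1 => simp [eo]
  | case2 x => cases k with
    | zero => rfl
    | succ m => simp [eo]
  | case3 x y t ih =>
      cases k with
      | zero => rfl
      | succ m =>
          have h2 : 2 * (m + 1) = (2 * m) + 1 + 1 := by omega
          simp only [eo, h2, List.getD_cons_succ]
          exact ih m
lemma oo_getD (l : List Int) (k : Nat) : (oo l).getD k 0 = l.getD (2 * k + 1) 0 := by
  cases l with
  | nil => simp [oo, eo]
  | cons x t => simpa [oo] using eo_getD t k

lemma map_range_eo (l : List Int) :
    eo l = (List.range ((l.length + 1)/2)).map (fun k => l.getD (2*k) 0) := by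
  apply List.ext_getElem
  · simp [eo_length]
  · intro i h1 h2
    simp only [List.getElem_map, List.getElem_range]
    rw [← List.getD_eq_getElem (eo l) 0 h1, eo_getD]

lemma slice2_even (l : List Int) : PySem.List.slice? l none none 2 = some (eo l) := by
  simp only [PySem.List.slice?, PySem.List.sliceIndices]
  norm_num
  have hc : (if 0 < l.length then (((l.length:Int) + 2 - 1) / 2).toNat else 0) = (l.length + 1)/2 := by
    split_ifs <;> omega
  rw [hc]
  rw [List.filterMap_congr (g := fun k => some (l.getD (2*k) 0)) ?_]
  · rw [show (fun k => some (l.getD (2*k) 0)) = some ∘ (fun k => l.getD (2*k) 0) from rfl,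
      List.filterMap_eq_map, ← map_range_eo]
  · intro k hk
    simp only [List.mem_range] at hk
    have h2 : (2 * (k:Int)).toNat = 2 * k := by omega
    have hlt : 2 * k < l.length := by omega
    simp only [h2, List.getElem?_eq_getElem hlt, List.getD_eq_getElem _ _ hlt]

lemma map_range_oo (l : List Int) :
    oo l = (List.range (l.length/2)).map (fun k => l.getD (2*k+1) 0) := by
  apply List.ext_getElem
  · simp [oo_length]
  · intro i h1 h2
    simp only [List.getElem_map, List.getElem_range]
    rw [← List.getD_eq_getElem (oo l) 0 h1, oo_getD]

lemma slice2_odd (l : List Int) : PySem.List.slice? l (some 1) none 2 = some (oo l) := by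
  cases l with
  | nil => rfl
  | cons x t =>
    simp only [PySem.List.slice?, PySem.List.sliceIndices]
    norm_num
    have hc : (if 0 < t.length then (((t.length:Int) + 2 - 1) / 2).toNat else 0) = (x::t).length/2 := by
      split_ifs <;> simp <;> omega
    rw [hc]
    rw [List.filterMap_congr (g := fun k => some ((x::t).getD (2*k+1) 0)) ?_]
    · rw [show (fun k => some ((x::t).getD (2*k+1) 0)) = some ∘ (fun k => (x::t).getD (2*k+1) 0) from rfl,
        List.filterMap_eq_map, ← map_range_oo]
    · intro k hk
      simp only [List.mem_range] at hk
      have h2 : ((1:Int) + 2 * (k:Int)).toNat = 2 * k + 1 := by omega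
      have hlt : 2 * k + 1 < (x::t).length := by simp at *; omega
      simp only [h2, List.getElem?_eq_getElem hlt, List.getD_eq_getElem _ _ hlt]

lemma eo_cons (x : Int) (t : List Int) : eo (x :: t) = x :: oo t := by
  cases t <;> rfl

lemma eo_oo_append (l : List Int) : ∀ t : List Int, l.length % 2 = 0 →
    eo (l ++ t) = eo l ++ eo t ∧ oo (l ++ t) = oo l ++ oo t := by
  induction l using eo.induct with
  | case1 => intro t _; simp [oo, eo]
  | case2 x => intro t h; simp at h
  | case3 x y u ih =>
      intro t h
      have h' : u.length % 2 = 0 := by simp at h; omega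
      obtain ⟨h1, h2⟩ := ih t h'
      constructor
      · simp only [List.cons_append, eo, h1]
      · show eo (y :: (u ++ t)) = eo (y :: u) ++ oo t
        rw [eo_cons, eo_cons]
        simpa using h2
      -- oo (x::y::u ++ t) = eo (y :: (u++t)) = y :: oo (u++t)

lemma eo_oo_reverse (l : List Int) (h : l.length % 2 = 0) :
    eo l.reverse = (oo l).reverse ∧ oo l.reverse = (eo l).reverse := by
  induction l using eo.induct with
  | case1 => simp [oo, eo]
  | case2 x => simp at h
  | case3 x y u ih =>
      have h' : u.length % 2 = 0 := by simp at h; omega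
      obtain ⟨h1, h2⟩ := ih h'
      have hrev : (x :: y :: u).reverse = u.reverse ++ [y, x] := by simp
      have heven : u.reverse.length % 2 = 0 := by simpa using h'
      obtain ⟨ha, hb⟩ := eo_oo_append u.reverse [y, x] heven
      constructor
      · rw [hrev, ha, h1]
        show (oo u).reverse ++ [y] = (oo (x :: y :: u)).reverse
        have : oo (x :: y :: u) = y :: oo u := by show eo (y :: u) = _; rw [eo_cons]
        simp [this]
      · rw [hrev, hb, h2]
        show (eo u).reverse ++ [x] = (eo (x :: y :: u)).reverse
        rw [eo_cons]
        simp [oo]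

lemma eo_sublist (l : List Int) : (eo l).Sublist l := by
  induction l using eo.induct with
  | case1 => simp [eo]
  | case2 x => simp [eo]
  | case3 x y t ih => exact (ih.cons _).cons₂ _

lemma oo_sublist (l : List Int) : (oo l).Sublist l := by
  cases l with
  | nil => simp [oo, eo]
  | cons x t => exact (eo_sublist t).cons _

lemma loop_inv (full : List Int) : ∀ (xs pre L R : List Int), pre ++ xs = full →
    (List.range' pre.length xs.length).foldl
      (fun (st : List Int × List Int) k =>
        if k % 2 = 0 then (st.1, st.2 ++ [full.getD k 0])
        else (st.1 ++ [full.getD k 0], st.2)) (L, R)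
    = if pre.length % 2 = 0 then (L ++ oo xs, R ++ eo xs) else (L ++ eo xs, R ++ oo xs) := by
  intro xs
  induction xs with
  | nil => intro pre L R _; simp [oo, eo]
  | cons x t ih =>
      intro pre L R hfull
      have hx : full.getD pre.length 0 = x := by
        rw [← hfull]
        rw [List.getD_eq_getElem _ _ (by simp)]
        simp [List.getElem_append_right (le_refl pre.length)]
      have hpre' : (pre ++ [x]).length = pre.length + 1 := by simp
      have hfull' : (pre ++ [x]) ++ t = full := by simpa using hfull
      have ihx := ih (pre ++ [x]) 
      simp only [List.length_cons]
      rw [List.range'_succ, List.foldl_cons]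
      by_cases hp : pre.length % 2 = 0
      · simp only [hp, if_pos, hx]
        have := ihx (L) (R ++ [x]) hfull'
        rw [hpre'] at this
        have hodd : (pre.length + 1) % 2 ≠ 0 := by omega
        rw [if_neg hodd] at this
        rw [this]
        simp [eo_cons, oo]
      · simp only [hx, if_neg hp]
        have := ihx (L ++ [x]) R hfull'
        rw [hpre'] at this
        have heven : (pre.length + 1) % 2 = 0 := by omega
        rw [if_pos heven] at this
        rw [this]
        simp [eo_cons, oo]

lemma loop_eval (lst : List Int) :
    (PySem.List.pyRange 0 (lst.length : Int)).foldl
      (fun (st : List Int × List Int) idx =>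
        if PySem.Int.mod idx 2 = 0 then (st.1, st.2 ++ [PySem.List.pyGetD lst idx 0])
        else (st.1 ++ [PySem.List.pyGetD lst idx 0], st.2)) ([], [])
    = (oo lst, eo lst) := by
  rw [PySem.List.pyRange_zero_natCast, List.foldl_map]
  have hbody : (fun (st : List Int × List Int) (k : Nat) =>
        if PySem.Int.mod (↑k) 2 = 0 then (st.1, st.2 ++ [PySem.List.pyGetD lst (↑k) 0])
        else (st.1 ++ [PySem.List.pyGetD lst (↑k) 0], st.2))
      = (fun (st : List Int × List Int) (k : Nat) =>
        if k % 2 = 0 then (st.1, st.2 ++ [lst.getD k 0])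
        else (st.1 ++ [lst.getD k 0], st.2)) := by
    funext st k
    rw [PySem.Int.mod_eq_emod_of_pos (by omega), PySem.List.pyGetD_natCast]
    have h3 : ((k:Int) % 2 = 0) ↔ (k % 2 = 0) := by omega
    simp [h3]
  rw [hbody, List.range_eq_range']
  have := loop_inv lst lst [] [] [] (by simp)
  simpa using this


lemma asc_pairwise (arr : List Int) : (PySem.List.sorted arr (fun x => x)).Pairwise (· ≤ ·) := by
  simpa using PySem.List.sorted_pairwise arr (fun x => x)

lemma sorted_true_eq_reverse (arr : List Int) :
    PySem.List.sorted arr (fun x => x) true = (PySem.List.sorted arr (fun x => x)).reverse := by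
  apply List.eq_of_perm_of_sorted (le := fun a b : Int => b ≤ a)
  · intro a b _ _ h1 h2; omega
  · exact PySem.List.sorted_pairwise_rev arr _
  · exact (List.pairwise_reverse).mpr (by simpa using asc_pairwise arr)
  · exact (PySem.List.sorted_perm arr _ true).trans
      ((PySem.List.sorted arr (fun x => x)).reverse_perm.trans
        (PySem.List.sorted_perm arr (fun x => x) false)).symm

lemma make_valley_eq (arr : List Int) : make_valley arr = make_valley_alt arr := by
  unfold make_valley make_valley_alt
  simp only [sorted_true_eq_reverse, slice2_even, slice2_odd, Option.getD_some,
    PySem.List.slice?_none_none_neg_one]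
  set ls := PySem.List.sorted arr (fun x => x) with hls
  have hpw : ls.Pairwise (· ≤ ·) := asc_pairwise arr
  by_cases hodd : ls.length % 2 = 1
  · -- odd length
    obtain ⟨c, rest, hcr⟩ : ∃ c rest, ls = c :: rest := by
      cases h : ls with
      | nil => rw [h] at hodd; simp at hodd
      | cons c rest => exact ⟨c, rest, rfl⟩
    rw [hcr]
    simp only [List.length_cons, PySem.List.pop?_zero_cons, if_pos (by rw [hcr] at hodd; simpa using hodd)]
    rw [loop_eval]
    dsimp only
    have hrest_even : rest.length % 2 = 0 := by rw [hcr] at hodd; simp at hodd; omega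
    have hrev_even : rest.reverse.length % 2 = 0 := by simpa using hrest_even
    have hpw_rest : rest.Pairwise (· ≤ ·) := by rw [hcr] at hpw; exact hpw.of_cons
    have hpw_oo : (oo rest).Pairwise (· ≤ ·) := hpw_rest.sublist (oo_sublist rest)
    rw [PySem.List.sorted_eq_self_of_pairwise _ _ (by simpa using hpw_oo)]
    -- B side: (c :: rest).reverse = rest.reverse ++ [c]
    rw [show (c :: rest).reverse = rest.reverse ++ [c] by simp]
    obtain ⟨ha, hb⟩ := eo_oo_append rest.reverse [c] hrev_even
    obtain ⟨h1, h2⟩ := eo_oo_reverse rest hrest_even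
    rw [ha, hb, h1, h2]
    simp [oo, eo]
  · have heven : ls.length % 2 = 0 := by omega
    rw [if_neg (by omega)]
    rw [loop_eval]
    dsimp only
    have hpw_oo : (oo ls).Pairwise (· ≤ ·) := hpw.sublist (oo_sublist ls)
    rw [PySem.List.sorted_eq_self_of_pairwise _ _ (by simpa using hpw_oo)]
    obtain ⟨h1, h2⟩ := eo_oo_reverse ls heven
    rw [h1, h2]
    simp

-- ===== VERDICT (by name: the statement is the Claim_ definition above) =====
theorem make_valley_spec : Claim_equal_make_valley := by
  intro arr _
  unfold Spec_make_valley
  exact make_valley_eq arr
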